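-- pv_equiv track=rewrite | github.com/sikakente/python_playground | django-tuts/juxt/interview/bowling_scoring.py | calculate_bonuses
-- ===== SOURCE A (Python) =====
-- def calculate_bonuses(idx, throws):
--     bonus = 0
--     for i in range(idx, len(throws)):
--         if i < len(throws) - 1:
--             if throws[i + 1] == 10:
--                 bonus += 10
--                 bonus += calculate_bonuses(idx + 1, throws)
--             else:
--                 bonus += throws[i + 1]
--                 if i + 2 < len(throws):
--                     bonus += throws[i + 2]
--
--     return bonus
-- ===== SOURCE B (Python) =====
-- def calculate_bonuses(idx, throws):
--     # Bottom-up linear recurrence: f(i) = s(i) + c(i)*f(i+1), where s/c are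
--     # suffix sums of the per-throw bonus terms and the count of 10-successors.
--     n = len(throws)
--     f = s = c = 0
--     for j in range(n - 2, idx - 1, -1):
--         nxt = throws[j + 1]
--         if nxt == 10:
--             c += 1
--             s += 10
--         else:
--             s += nxt + (throws[j + 2] if j + 2 < n else 0)
--         f = s + c * f
--     return f
-- ===== Notes on version B (the rewrite author's own statement) =====
-- stated objective: alternative
-- what changed: Replaced A's top-down recursion (re-invoked once per 10-successor inside the loop, exponential in the number of tens) by a single bottom-up pass that maintains the suffix sums s, c and the linear recurrence f = s + c*f; on inputs with few tens both are linear, so no speed label is claimed.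
import Mathlib
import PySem

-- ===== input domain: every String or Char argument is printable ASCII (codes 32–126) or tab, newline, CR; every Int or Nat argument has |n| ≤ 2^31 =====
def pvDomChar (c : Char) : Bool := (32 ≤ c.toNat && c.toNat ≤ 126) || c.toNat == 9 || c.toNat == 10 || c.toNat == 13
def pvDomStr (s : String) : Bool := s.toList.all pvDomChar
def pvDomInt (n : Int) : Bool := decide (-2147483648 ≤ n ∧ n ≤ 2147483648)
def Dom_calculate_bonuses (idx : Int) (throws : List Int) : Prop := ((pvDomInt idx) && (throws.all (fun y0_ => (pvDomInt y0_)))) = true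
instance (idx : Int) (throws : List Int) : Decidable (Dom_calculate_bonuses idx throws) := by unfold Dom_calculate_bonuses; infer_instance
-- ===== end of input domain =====

-- B replaces A's per-10 recursive re-summation by one bottom-up pass maintaining suffix sums and the recurrence f = s + c*f.

-- ===== PORT A =====
-- literal transliteration of A; the fuel argument only makes the recursion
-- (which Python bounds by idx reaching len(throws)) structurally total
def calcA (throws : List Int) : Nat → Int → Int
  | 0, _ => 0
  | fuel + 1, idx =>
    (PySem.List.pyRange idx (throws.length : Int) 1).foldl (fun bonus i =>
      if i < (throws.length : Int) - 1 then
        if PySem.List.pyGetD throws (i + 1) 0 = 10 then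
          bonus + 10 + calcA throws fuel (idx + 1)
        else
          bonus + PySem.List.pyGetD throws (i + 1) 0 +
            (if i + 2 < (throws.length : Int) then PySem.List.pyGetD throws (i + 2) 0 else 0)
      else bonus) 0

def calculate_bonuses (idx : Int) (throws : List Int) : Int :=
  calcA throws (((throws.length : Int) - idx).toNat + 1) idx

-- ===== PORT B =====
-- one step of B's loop body, on the state (f, s, c)
def altStep (throws : List Int) (st : Int × Int × Int) (j : Int) : Int × Int × Int :=
  let nxt := PySem.List.pyGetD throws (j + 1) 0
  if nxt = 10 then
    let c := st.2.2 + 1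
    let s := st.2.1 + 10
    (s + c * st.1, s, c)
  else
    let s := st.2.1 + (nxt + (if j + 2 < (throws.length : Int) then PySem.List.pyGetD throws (j + 2) 0 else 0))
    (s + st.2.2 * st.1, s, st.2.2)

def calculate_bonuses_alt (idx : Int) (throws : List Int) : Int :=
  ((PySem.List.pyRange ((throws.length : Int) - 2) (idx - 1) (-1)).foldl (altStep throws) (0, 0, 0)).1

-- ===== PRECONDITION & SPEC =====
-- Pre_ excludes exactly the inputs where Python A raises IndexError
-- (some accessed index idx+1 below -len(throws)); Python B raises there too.
def Pre_calculate_bonuses (idx : Int) (throws : List Int) : Prop :=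
  -((throws.length : Int) + 1) ≤ idx
instance (idx : Int) (throws : List Int) : Decidable (Pre_calculate_bonuses idx throws) := by unfold Pre_calculate_bonuses; infer_instance

def pvWitness_calculate_bonuses : Int × List Int := (0, [10, 3, 4, 10, 2])

def Spec_calculate_bonuses (idx : Int) (throws : List Int) (out : Int) : Prop := out = calculate_bonuses_alt idx throws
instance (idx : Int) (throws : List Int) (out : Int) : Decidable (Spec_calculate_bonuses idx throws out) := by unfold Spec_calculate_bonuses; infer_instance

-- ===== CLAIM (what is proved, stated in full; the proofs are below) =====
def Claim_equal_calculate_bonuses : Prop := ∀ (idx : Int) (throws : List Int), Dom_calculate_bonuses idx throws → Pre_calculate_bonuses idx throws → Spec_calculate_bonuses idx throws (calculate_bonuses idx throws)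

-- ===== LEMMAS AND PROOFS =====

-- reference recurrence: G throws idx = (f, s, c) at index idx
def G (throws : List Int) (idx : Int) : Int × Int × Int :=
  if (throws.length : Int) - 1 ≤ idx then (0, 0, 0)
  else altStep throws (G throws (idx + 1)) idx
termination_by ((throws.length : Int) - 1 - idx).toNat
decreasing_by omega

theorem G_base (throws : List Int) (idx : Int) (h : (throws.length : Int) - 1 ≤ idx) :
    G throws idx = (0, 0, 0) := by rw [G]; simp [h]

theorem G_step (throws : List Int) (idx : Int) (h : idx < (throws.length : Int) - 1) :
    G throws idx = altStep throws (G throws (idx + 1)) idx := by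
  rw [G]; simp [not_le.mpr h]

-- f(idx) = s(idx) + c(idx) * f(idx+1), in all cases
theorem G_fst (throws : List Int) (idx : Int) :
    (G throws idx).1 = (G throws idx).2.1 + (G throws idx).2.2 * (G throws (idx + 1)).1 := by
  by_cases h : (throws.length : Int) - 1 ≤ idx
  · rw [G_base throws idx h, G_base throws (idx + 1) (by omega)]; simp
  · rw [G_step throws idx (by omega)]
    unfold altStep
    by_cases h10 : PySem.List.pyGetD throws (idx + 1) 0 = 10 <;> simp [h10]

-- B's foldl, run from a down to b+1, carries the state from G (a+1) to G (b+1)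
theorem foldl_altStep (throws : List Int) :
    ∀ (a b : Int), b ≤ a → a ≤ (throws.length : Int) - 2 →
      (PySem.List.pyRange a b (-1)).foldl (altStep throws) (G throws (a + 1)) = G throws (b + 1) := by
  intro a b hba
  induction a, hba using Int.le_induction with
  | base =>
    intro _
    rw [PySem.List.pyRange_neg_one_eq_nil (le_refl b)]
    rfl
  | succ a hba ih =>
    intro ha
    rw [PySem.List.pyRange_neg_one_cons (by omega), List.foldl_cons]
    have hstep : altStep throws (G throws (a + 1 + 1)) (a + 1) = G throws (a + 1) :=
      (G_step throws (a + 1) (by omega)).symm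
    rw [hstep]
    have : a + 1 - 1 = a := by ring
    rw [this]
    exact ih (by omega)

-- B's port computes G's first component
theorem alt_eq_G (idx : Int) (throws : List Int) :
    calculate_bonuses_alt idx throws = (G throws idx).1 := by
  unfold calculate_bonuses_alt
  by_cases h : (throws.length : Int) - 2 ≤ idx - 1
  · rw [PySem.List.pyRange_neg_one_eq_nil h, List.foldl_nil, G_base throws idx (by omega)]
  · have h0 : G throws ((throws.length : Int) - 2 + 1) = (0, 0, 0) :=
      G_base throws _ (by omega)
    rw [← h0, foldl_altStep throws ((throws.length : Int) - 2) (idx - 1) (by omega) (by omega)]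
    have : idx - 1 + 1 = idx := by ring
    rw [this]

-- per-index contribution of A's loop, with r the (constant) recursive value
def gTerm (throws : List Int) (r : Int) (i : Int) : Int :=
  if i < (throws.length : Int) - 1 then
    if PySem.List.pyGetD throws (i + 1) 0 = 10 then 10 + r
    else PySem.List.pyGetD throws (i + 1) 0 +
      (if i + 2 < (throws.length : Int) then PySem.List.pyGetD throws (i + 2) 0 else 0)
  else 0

-- the summed contributions over [a, n) equal s(a) + c(a) * r
theorem sum_gTerm (throws : List Int) (r : Int) :
    ∀ (k : Nat) (a : Int), ((throws.length : Int) - a).toNat ≤ k →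
      (((PySem.List.pyRange a (throws.length : Int) 1).map (gTerm throws r)).sum : Int)
        = (G throws a).2.1 + (G throws a).2.2 * r := by
  intro k
  induction k with
  | zero =>
    intro a ha
    rw [PySem.List.pyRange_one_eq_nil (by omega), G_base throws a (by omega)]
    simp
  | succ k ih =>
    intro a ha
    by_cases hlt : a < (throws.length : Int)
    · rw [PySem.List.pyRange_one_cons hlt, List.map_cons, List.sum_cons,
        ih (a + 1) (by omega)]
      by_cases hend : a < (throws.length : Int) - 1
      · rw [G_step throws a hend]
        unfold altStep gTerm
        by_cases h10 : PySem.List.pyGetD throws (a + 1) 0 = 10 <;>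
          simp [h10, hend] <;> ring
      · have ha1 : (throws.length : Int) - 1 ≤ a := by omega
        rw [G_base throws a ha1, G_base throws (a + 1) (by omega)]
        unfold gTerm
        simp [not_lt.mpr ha1]
    · rw [PySem.List.pyRange_one_eq_nil (by omega), G_base throws a (by omega)]
      simp

-- A's port computes G's first component (given enough fuel)
theorem calcA_eq_G (throws : List Int) :
    ∀ (fuel : Nat) (idx : Int), ((throws.length : Int) - idx).toNat < fuel →
      calcA throws fuel idx = (G throws idx).1 := by
  intro fuel
  induction fuel with
  | zero => intro idx h; omega
  | succ fuel ih =>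
    intro idx h
    show calcA throws (fuel + 1) idx = (G throws idx).1
    rw [calcA]
    by_cases hlt : idx < (throws.length : Int)
    · have hrec : calcA throws fuel (idx + 1) = (G throws (idx + 1)).1 :=
        ih (idx + 1) (by omega)
      have hfun : (fun (bonus : Int) (i : Int) =>
          if i < (throws.length : Int) - 1 then
            if PySem.List.pyGetD throws (i + 1) 0 = 10 then
              bonus + 10 + calcA throws fuel (idx + 1)
            else
              bonus + PySem.List.pyGetD throws (i + 1) 0 +
                (if i + 2 < (throws.length : Int) then PySem.List.pyGetD throws (i + 2) 0 else 0)
          else bonus)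
          = fun (bonus : Int) (i : Int) => bonus + gTerm throws ((G throws (idx + 1)).1) i := by
        funext bonus i
        unfold gTerm
        rw [hrec]
        by_cases h1 : i < (throws.length : Int) - 1 <;>
          by_cases h10 : PySem.List.pyGetD throws (i + 1) 0 = 10 <;>
          simp [h1, h10] <;> ring
      rw [hfun, PySem.List.foldl_add,
        sum_gTerm throws ((G throws (idx + 1)).1) (((throws.length : Int) - idx).toNat) idx (le_refl _),
        G_fst throws idx]
      ring
    · rw [PySem.List.pyRange_one_eq_nil (by omega), List.foldl_nil,
        G_base throws idx (by omega)]

-- ===== VERDICT (by name: the statement is the Claim_ definition above) =====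
theorem calculate_bonuses_spec : Claim_equal_calculate_bonuses := by
  intro idx throws _ _
  unfold Spec_calculate_bonuses calculate_bonuses
  rw [calcA_eq_G throws _ idx (by omega), alt_eq_G]
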